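-- pv_equiv track=rewrite | github.com/christophjonetzko-stack/kranvergleich | scripts/boels_scrape.py | city_slug_from_branch
-- ===== SOURCE A (Python) =====
-- SEO_CITIES = {
--     "berlin": ("Berlin", "Berlin"),
--     "hamburg": ("Hamburg", "Hamburg"),
--     "duesseldorf": ("Düsseldorf", "Nordrhein-Westfalen"),
--     "koeln": ("Köln", "Nordrhein-Westfalen"),
--     "dortmund": ("Dortmund", "Nordrhein-Westfalen"),
--     "leipzig": ("Leipzig", "Sachsen"),
--     "bremen": ("Bremen", "Bremen"),
--     "mannheim": ("Mannheim", "Baden-Württemberg"),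
--     "hannover": ("Hannover", "Niedersachsen"),
--     "potsdam": ("Potsdam", "Brandenburg"),
--     "karlsruhe": ("Karlsruhe", "Baden-Württemberg"),
--     "nuernberg": ("Nürnberg", "Bayern"),
--     "stuttgart": ("Stuttgart", "Baden-Württemberg"),
--     "brandenburg": ("Brandenburg", "Brandenburg"),
--     "augsburg": ("Augsburg", "Bayern"),
--     "braunschweig": ("Braunschweig", "Niedersachsen"),
--     "frankfurt-am-main": ("Frankfurt am Main", "Hessen"),
--     "essen": ("Essen", "Nordrhein-Westfalen"),
--     "oranienburg": ("Oranienburg", "Brandenburg"),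
--     "muenchen": ("München", "Bayern"),
--     "fredersdorf-vogelsdorf": ("Fredersdorf-Vogelsdorf", "Brandenburg"),
--     "moenchengladbach": ("Mönchengladbach", "Nordrhein-Westfalen"),
--     "krefeld": ("Krefeld", "Nordrhein-Westfalen"),
--     "blankenfelde-mahlow": ("Blankenfelde-Mahlow", "Brandenburg"),
--     "duisburg": ("Duisburg", "Nordrhein-Westfalen"),
--     "crailsheim": ("Crailsheim", "Baden-Württemberg"),
--     "cottbus": ("Cottbus", "Brandenburg"),
--     "ludwigsfelde": ("Ludwigsfelde", "Brandenburg"),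
--     "ingolstadt": ("Ingolstadt", "Bayern"),
--     "dresden": ("Dresden", "Sachsen"),
--     "herne": ("Herne", "Nordrhein-Westfalen"),
--     "hildesheim": ("Hildesheim", "Niedersachsen"),
--     "luebeck": ("Lübeck", "Schleswig-Holstein"),
--     "neubrandenburg": ("Neubrandenburg", "Mecklenburg-Vorpommern"),
--     "muenster": ("Münster", "Nordrhein-Westfalen"),
--     "lueneburg": ("Lüneburg", "Niedersachsen"),
--     "ruedersdorf": ("Rüdersdorf", "Brandenburg"),
--     "schwedt": ("Schwedt", "Brandenburg"),
--     "ulm": ("Ulm", "Baden-Württemberg"),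
--     "wiesbaden": ("Wiesbaden", "Hessen"),
--     "wuppertal": ("Wuppertal", "Nordrhein-Westfalen"),
-- }
--
-- URL_ALIASES = {
--     "frankfurt": "frankfurt-am-main",
-- }
--
-- def city_slug_from_branch(url: str) -> str:
--     """Extract last path segment → strip Boels-specific suffixes → base city slug.
--     E.g. 'muenchen-feldkirchen' → 'muenchen', 'koeln-frechen' → 'koeln'.
--     Falls back to URL alias map for mismatched names (frankfurt → frankfurt-am-main).
--     """
--     tail = url.rsplit("/", 1)[-1]
--     # Try matching each seoCity slug as prefix (longest first)
--     for slug in sorted(SEO_CITIES.keys(), key=len, reverse=True):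
--         if tail == slug or tail.startswith(slug + "-"):
--             return slug
--     # Try alias prefixes (e.g. frankfurt-* → frankfurt-am-main)
--     for alias, canonical in URL_ALIASES.items():
--         if tail == alias or tail.startswith(alias + "-"):
--             return canonical
--     return tail  # not matched
-- ===== SOURCE B (Python) =====
-- SEO_SLUGS = {
--     "berlin", "hamburg", "duesseldorf", "koeln", "dortmund", "leipzig",
--     "bremen", "mannheim", "hannover", "potsdam", "karlsruhe", "nuernberg",
--     "stuttgart", "brandenburg", "augsburg", "braunschweig",
--     "frankfurt-am-main", "essen", "oranienburg", "muenchen",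
--     "fredersdorf-vogelsdorf", "moenchengladbach", "krefeld",
--     "blankenfelde-mahlow", "duisburg", "crailsheim", "cottbus",
--     "ludwigsfelde", "ingolstadt", "dresden", "herne", "hildesheim",
--     "luebeck", "neubrandenburg", "muenster", "lueneburg", "ruedersdorf",
--     "schwedt", "ulm", "wiesbaden", "wuppertal",
-- }
--
-- URL_ALIASES = {
--     "frankfurt": "frankfurt-am-main",
-- }
--
-- def city_slug_from_branch(url: str) -> str:
--     """Peel the tail back to the previous hyphen boundary until a known base
--     slug (then an alias) is hit, instead of scanning every known slug."""
--     tail = url[url.rfind("/") + 1:]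
--     cand = tail
--     while True:
--         if cand in SEO_SLUGS:
--             return cand
--         cut = cand.rfind("-")
--         if cut < 0:
--             break
--         cand = cand[:cut]
--     cand = tail
--     while True:
--         if cand in URL_ALIASES:
--             return URL_ALIASES[cand]
--         cut = cand.rfind("-")
--         if cut < 0:
--             break
--         cand = cand[:cut]
--     return tail
-- ===== Notes on version B (the rewrite author's own statement) =====
-- stated objective: alternative
-- what changed: Instead of scanning all 41 known slugs sorted by length against the tail, B peels the tail back one hyphen boundary at a time (rfind('-') loop) and tests each shrinking candidate for membership in the slug set, then in the alias map.
import Mathlib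
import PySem

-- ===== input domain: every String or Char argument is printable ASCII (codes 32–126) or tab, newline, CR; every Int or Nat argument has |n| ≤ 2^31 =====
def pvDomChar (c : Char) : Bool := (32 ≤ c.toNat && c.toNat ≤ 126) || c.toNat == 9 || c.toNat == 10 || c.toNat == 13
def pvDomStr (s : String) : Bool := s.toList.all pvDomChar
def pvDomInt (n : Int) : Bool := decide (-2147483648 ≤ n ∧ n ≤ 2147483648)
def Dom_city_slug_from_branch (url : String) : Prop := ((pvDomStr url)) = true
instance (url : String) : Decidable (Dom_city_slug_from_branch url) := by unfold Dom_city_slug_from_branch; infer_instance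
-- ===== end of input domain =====

-- B replaces A's scan over all known slugs (sorted by length) by peeling the tail back one
-- hyphen boundary at a time and testing each shrinking candidate (objective: alternative).

-- ===== PORT A =====
-- hand port of `url.rsplit("/", 1)[-1]` (exact: the suffix after the last '/', whole string if none)
def pvTail (cs : List Char) : List Char := (cs.reverse.takeWhile (fun c => !(c == '/'))).reverse

-- SEO_CITIES (module constant; values are never returned by the function)
def seoDict : PySem.Dict (List Char) (String × String) := PySem.Dict.mk
  [ ("berlin".toList, ("Berlin", "Berlin"))
  , ("hamburg".toList, ("Hamburg", "Hamburg"))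
  , ("duesseldorf".toList, ("Düsseldorf", "Nordrhein-Westfalen"))
  , ("koeln".toList, ("Köln", "Nordrhein-Westfalen"))
  , ("dortmund".toList, ("Dortmund", "Nordrhein-Westfalen"))
  , ("leipzig".toList, ("Leipzig", "Sachsen"))
  , ("bremen".toList, ("Bremen", "Bremen"))
  , ("mannheim".toList, ("Mannheim", "Baden-Württemberg"))
  , ("hannover".toList, ("Hannover", "Niedersachsen"))
  , ("potsdam".toList, ("Potsdam", "Brandenburg"))
  , ("karlsruhe".toList, ("Karlsruhe", "Baden-Württemberg"))
  , ("nuernberg".toList, ("Nürnberg", "Bayern"))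
  , ("stuttgart".toList, ("Stuttgart", "Baden-Württemberg"))
  , ("brandenburg".toList, ("Brandenburg", "Brandenburg"))
  , ("augsburg".toList, ("Augsburg", "Bayern"))
  , ("braunschweig".toList, ("Braunschweig", "Niedersachsen"))
  , ("frankfurt-am-main".toList, ("Frankfurt am Main", "Hessen"))
  , ("essen".toList, ("Essen", "Nordrhein-Westfalen"))
  , ("oranienburg".toList, ("Oranienburg", "Brandenburg"))
  , ("muenchen".toList, ("München", "Bayern"))
  , ("fredersdorf-vogelsdorf".toList, ("Fredersdorf-Vogelsdorf", "Brandenburg"))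
  , ("moenchengladbach".toList, ("Mönchengladbach", "Nordrhein-Westfalen"))
  , ("krefeld".toList, ("Krefeld", "Nordrhein-Westfalen"))
  , ("blankenfelde-mahlow".toList, ("Blankenfelde-Mahlow", "Brandenburg"))
  , ("duisburg".toList, ("Duisburg", "Nordrhein-Westfalen"))
  , ("crailsheim".toList, ("Crailsheim", "Baden-Württemberg"))
  , ("cottbus".toList, ("Cottbus", "Brandenburg"))
  , ("ludwigsfelde".toList, ("Ludwigsfelde", "Brandenburg"))
  , ("ingolstadt".toList, ("Ingolstadt", "Bayern"))
  , ("dresden".toList, ("Dresden", "Sachsen"))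
  , ("herne".toList, ("Herne", "Nordrhein-Westfalen"))
  , ("hildesheim".toList, ("Hildesheim", "Niedersachsen"))
  , ("luebeck".toList, ("Lübeck", "Schleswig-Holstein"))
  , ("neubrandenburg".toList, ("Neubrandenburg", "Mecklenburg-Vorpommern"))
  , ("muenster".toList, ("Münster", "Nordrhein-Westfalen"))
  , ("lueneburg".toList, ("Lüneburg", "Niedersachsen"))
  , ("ruedersdorf".toList, ("Rüdersdorf", "Brandenburg"))
  , ("schwedt".toList, ("Schwedt", "Brandenburg"))
  , ("ulm".toList, ("Ulm", "Baden-Württemberg"))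
  , ("wiesbaden".toList, ("Wiesbaden", "Hessen"))
  , ("wuppertal".toList, ("Wuppertal", "Nordrhein-Westfalen")) ]

-- URL_ALIASES (module constant, shared by both ports)
def aliasDict : PySem.Dict (List Char) (List Char) := PySem.Dict.mk
  [ ("frankfurt".toList, "frankfurt-am-main".toList) ]

-- `tail == slug or tail.startswith(slug + "-")`
def slugMatch (tail slug : List Char) : Bool :=
  tail == slug || PySem.Chars.startswith tail (slug ++ ['-'])

-- `for slug in sorted(...): if ...: return slug`
def scanSeo (tail : List Char) : List (List Char) → Option (List Char)
  | [] => none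
  | slug :: rest => if slugMatch tail slug then some slug else scanSeo tail rest

-- `for alias, canonical in URL_ALIASES.items(): if ...: return canonical`
def scanAlias (tail : List Char) : List (List Char × List Char) → Option (List Char)
  | [] => none
  | (al, canonical) :: rest => if slugMatch tail al then some canonical else scanAlias tail rest

def city_slug_from_branch (url : String) : String :=
  let tail := pvTail url.toList
  let sortedSlugs := PySem.List.sorted seoDict.keys PySem.Chars.len true
  match scanSeo tail sortedSlugs with
  | some slug => String.ofList slug
  | none =>
    match scanAlias tail aliasDict.items with
    | some canonical => String.ofList canonical
    | none => String.ofList tail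

-- ===== PORT B =====
-- SEO_SLUGS (Source B's set of base slugs; a Python set is a list of distinct elements)
def seoSlugs : List (List Char) :=
  [ "berlin".toList, "hamburg".toList, "duesseldorf".toList, "koeln".toList
  , "dortmund".toList, "leipzig".toList, "bremen".toList, "mannheim".toList
  , "hannover".toList, "potsdam".toList, "karlsruhe".toList, "nuernberg".toList
  , "stuttgart".toList, "brandenburg".toList, "augsburg".toList, "braunschweig".toList
  , "frankfurt-am-main".toList, "essen".toList, "oranienburg".toList, "muenchen".toList
  , "fredersdorf-vogelsdorf".toList, "moenchengladbach".toList, "krefeld".toList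
  , "blankenfelde-mahlow".toList, "duisburg".toList, "crailsheim".toList, "cottbus".toList
  , "ludwigsfelde".toList, "ingolstadt".toList, "dresden".toList, "herne".toList
  , "hildesheim".toList, "luebeck".toList, "neubrandenburg".toList, "muenster".toList
  , "lueneburg".toList, "ruedersdorf".toList, "schwedt".toList, "ulm".toList
  , "wiesbaden".toList, "wuppertal".toList ]

-- hand port of `s.rfind(c)` (exact: highest index of c in s, or -1)
def pvRfind (cs : List Char) (c : Char) : Int :=
  match cs.reverse.findIdx? (fun a => a == c) with
  | some j => (cs.length : Int) - 1 - (j : Int)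
  | none => -1

-- termination fact for the peel loops (cited by decreasing_by)
theorem pvRfind_slice_lt {cs : List Char} {c : Char} (h : ¬ pvRfind cs c < 0) :
    (PySem.List.slice cs none (some (pvRfind cs c))).length < cs.length := by
  cases hf : cs.reverse.findIdx? (fun a => a == c) with
  | none => exact absurd (by simp [pvRfind, hf]) h
  | some j =>
    obtain ⟨hj, -, -⟩ := List.findIdx?_eq_some_iff_getElem.mp hf
    rw [List.length_reverse] at hj
    have hr : pvRfind cs c = (cs.length : Int) - 1 - (j : Int) := by simp [pvRfind, hf]
    rw [hr, PySem.List.slice_to _ (by omega)]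
    simp only [List.length_take]
    omega

-- first while-loop: peel `cand` at its last '-' until it is a known base slug
def peelSeo (cand : List Char) : Option (List Char) :=
  if cand ∈ seoSlugs then some cand
  else if h : pvRfind cand '-' < 0 then none
  else peelSeo (PySem.List.slice cand none (some (pvRfind cand '-')))
termination_by cand.length
decreasing_by exact pvRfind_slice_lt h

-- second while-loop: peel again, matching the alias map
def peelAlias (cand : List Char) : Option (List Char) :=
  if aliasDict.contains cand then aliasDict.get? cand
  else if h : pvRfind cand '-' < 0 then none
  else peelAlias (PySem.List.slice cand none (some (pvRfind cand '-')))
termination_by cand.length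
decreasing_by exact pvRfind_slice_lt h

def city_slug_from_branch_alt (url : String) : String :=
  let cs := url.toList
  let tail := PySem.List.slice cs (some (pvRfind cs '/' + 1)) none
  String.ofList (((peelSeo tail).orElse fun _ => peelAlias tail).getD tail)

-- ===== PRECONDITION & SPEC =====
def Spec_city_slug_from_branch (url : String) (out : String) : Prop := out = city_slug_from_branch_alt url
instance (url : String) (out : String) : Decidable (Spec_city_slug_from_branch url out) := by unfold Spec_city_slug_from_branch; infer_instance

-- ===== CLAIM (what is proved, stated in full; the proofs are below) =====
def Claim_equal_city_slug_from_branch : Prop := ∀ (url : String), Dom_city_slug_from_branch url → Spec_city_slug_from_branch url (city_slug_from_branch url)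

-- ===== LEMMAS AND PROOFS =====

-- B's tail computation agrees with A's
theorem takeWhile_of_findIdx? (l : List Char) (c : Char) (j : Nat)
    (h : l.findIdx? (fun a => a == c) = some j) :
    l.takeWhile (fun a => !(a == c)) = l.take j := by
  induction l generalizing j with
  | nil => simp at h
  | cons a t ih =>
    rw [List.findIdx?_cons] at h
    by_cases ha : (a == c) = true
    · rw [if_pos ha] at h
      obtain rfl : (0 : Nat) = j := by simpa using h
      simp [List.takeWhile_cons, ha]
    · rw [if_neg ha] at h
      cases hfi : t.findIdx? (fun a => a == c) with
      | none => rw [hfi] at h; simp at h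
      | some j' =>
        rw [hfi] at h
        simp only [Option.map_some, Option.some.injEq] at h
        subst h
        simp [List.takeWhile_cons, ha, ih _ hfi]

theorem tailB_eq (cs : List Char) :
    PySem.List.slice cs (some (pvRfind cs '/' + 1)) none = pvTail cs := by
  unfold pvTail
  cases hf : cs.reverse.findIdx? (fun a => a == '/') with
  | none =>
    have h0 : pvRfind cs '/' = -1 := by simp [pvRfind, hf]
    rw [h0, show (-1 : Int) + 1 = 0 from by norm_num, PySem.List.slice_from _ le_rfl]
    rw [List.takeWhile_eq_self_iff.mpr (by
      intro x hx
      simpa using List.findIdx?_eq_none_iff.mp hf x hx)]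
    simp
  | some j =>
    obtain ⟨hj, -, -⟩ := List.findIdx?_eq_some_iff_getElem.mp hf
    rw [List.length_reverse] at hj
    have h2 : pvRfind cs '/' + 1 = ((cs.length - j : Nat) : Int) := by
      simp only [pvRfind, hf]
      omega
    rw [h2, PySem.List.slice_from _ (by omega), takeWhile_of_findIdx? _ _ _ hf,
      List.take_reverse, List.reverse_reverse, Int.toNat_natCast]

-- ---- facts about pvRfind ----
theorem pvRfind_neg {cs : List Char} {c : Char} (h : pvRfind cs c < 0) :
    ∀ k (_ : k < cs.length), cs[k] ≠ c := by
  intro k hk hkc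
  cases hf : cs.reverse.findIdx? (fun a => a == c) with
  | some j =>
    obtain ⟨hj, -, -⟩ := List.findIdx?_eq_some_iff_getElem.mp hf
    rw [List.length_reverse] at hj
    simp only [pvRfind, hf] at h
    omega
  | none =>
    have := List.findIdx?_eq_none_iff.mp hf cs[k] (by
      rw [List.mem_reverse]; exact List.getElem_mem hk)
    simp [hkc] at this

theorem pvRfind_spec {cs : List Char} {c : Char} (h : ¬ pvRfind cs c < 0) :
    ∃ (m : Nat) (hm : m < cs.length), pvRfind cs c = (m : Int) ∧ cs[m] = c ∧
      ∀ k (_ : k < cs.length), cs[k] = c → k ≤ m := by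
  cases hf : cs.reverse.findIdx? (fun a => a == c) with
  | none => exact absurd (by simp [pvRfind, hf]) h
  | some j =>
    obtain ⟨hj, hpj, hmin⟩ := List.findIdx?_eq_some_iff_getElem.mp hf
    rw [List.length_reverse] at hj
    refine ⟨cs.length - 1 - j, by omega, ?_, ?_, ?_⟩
    · simp only [pvRfind, hf]
      omega
    · rw [List.getElem_reverse] at hpj
      exact beq_iff_eq.mp hpj
    · intro k hk hke
      by_contra hgt
      push_neg at hgt
      have := hmin (cs.length - 1 - k) (by omega)
      rw [List.getElem_reverse] at this
      simp only [show cs.length - 1 - (cs.length - 1 - k) = k from by omega] at this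
      simp [hke] at this

-- ---- A's scan as find? ----
theorem scanSeo_eq_find? (tail : List Char) (l : List (List Char)) :
    scanSeo tail l = l.find? (slugMatch tail) := by
  induction l with
  | nil => rfl
  | cons a rest ih =>
    by_cases h : slugMatch tail a = true
    · simp [scanSeo, h, List.find?_cons_of_pos h]
    · simp only [scanSeo, if_neg h, List.find?_cons_of_neg h, ih]

-- a slug that matches is a prefix of the tail, hence determined by its length
theorem match_prefix {tail p : List Char} (h : slugMatch tail p = true) : p <+: tail := by
  rcases Bool.or_eq_true_iff.1 h with h | h
  · exact (beq_iff_eq.1 h) ▸ List.prefix_refl _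
  · exact (List.prefix_append p ['-']).trans ((PySem.Chars.startswith_iff _ _).1 h)

theorem match_unique {tail p q : List Char} (hp : slugMatch tail p = true)
    (hq : slugMatch tail q = true) (hl : p.length = q.length) : p = q := by
  have h1 := List.prefix_iff_eq_take.1 (match_prefix hp)
  have h2 := List.prefix_iff_eq_take.1 (match_prefix hq)
  rw [h1, h2, hl]

theorem take_hyphen_prefix {tail : List Char} {k : Nat} (hk : k < tail.length)
    (hch : tail[k] = '-') : (tail.take k ++ ['-']) <+: tail := by
  refine ⟨tail.drop (k + 1), ?_⟩
  rw [List.append_assoc]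
  conv_rhs => rw [← List.take_append_drop k tail, List.drop_eq_getElem_cons hk, hch]
  simp

-- ---- the chain of candidates B's peel loops walk through (proof-side helper) ----
def candChain (cand : List Char) : List (List Char) :=
  if h : pvRfind cand '-' < 0 then [cand]
  else cand :: candChain (PySem.List.slice cand none (some (pvRfind cand '-')))
termination_by cand.length
decreasing_by exact pvRfind_slice_lt h

theorem peelSeo_eq_find? (cand : List Char) :
    peelSeo cand = (candChain cand).find? (fun x => decide (x ∈ seoSlugs)) := by
  fun_induction peelSeo cand with
  | case1 cand hmem =>
    rw [candChain]
    split
    · simp [List.find?_cons, hmem]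
    · simp [List.find?_cons, hmem]
  | case2 cand hmem h =>
    rw [candChain, dif_pos h]
    simp [List.find?_cons, hmem]
  | case3 cand hmem h ih =>
    rw [candChain, dif_neg h]
    simp [List.find?_cons, hmem, ih]

theorem peelAlias_eq_find? (cand : List Char) :
    peelAlias cand =
      ((candChain cand).find? (fun x => decide (x ∈ aliasDict.keys))).bind aliasDict.get? := by
  fun_induction peelAlias cand with
  | case1 cand hc =>
    have hm : cand ∈ aliasDict.keys := by
      rw [PySem.Dict.contains_eq_decide_mem_keys] at hc
      exact of_decide_eq_true hc
    rw [candChain]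
    split
    · simp [List.find?_cons, hm]
    · simp [List.find?_cons, hm]
  | case2 cand hc h =>
    have hm : cand ∉ aliasDict.keys := by
      intro hx
      rw [PySem.Dict.contains_eq_decide_mem_keys] at hc
      simp [hx] at hc
    rw [candChain, dif_pos h]
    simp [List.find?_cons, hm]
  | case3 cand hc h ih =>
    have hm : cand ∉ aliasDict.keys := by
      intro hx
      rw [PySem.Dict.contains_eq_decide_mem_keys] at hc
      simp [hx] at hc
    rw [candChain, dif_neg h]
    simp [List.find?_cons, hm, ih]

theorem len_le_of_mem_candChain (c p : List Char) : p ∈ candChain c → p.length ≤ c.length := by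
  fun_induction candChain c with
  | case1 c h1 =>
    intro h
    rw [List.mem_singleton] at h
    subst h
    exact le_rfl
  | case2 c h1 ih =>
    intro h
    rcases List.mem_cons.1 h with rfl | h2
    · exact le_rfl
    · exact (ih h2).trans (le_of_lt (pvRfind_slice_lt h1))

theorem candChain_desc (c : List Char) :
    (candChain c).Pairwise (fun a b => b.length < a.length) := by
  fun_induction candChain c with
  | case1 c h => simp
  | case2 c h ih =>
    refine List.pairwise_cons.2 ⟨?_, ih⟩
    intro x hx
    exact lt_of_le_of_lt (len_le_of_mem_candChain _ _ hx) (pvRfind_slice_lt h)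

theorem mem_candChain_iff (tail p : List Char) :
    p ∈ candChain tail ↔ slugMatch tail p = true := by
  fun_induction candChain tail with
  | case1 tail h =>
    simp only [List.mem_singleton]
    constructor
    · rintro rfl
      simp [slugMatch]
    · intro hm
      rcases Bool.or_eq_true_iff.1 hm with hb | hs
      · exact (beq_iff_eq.1 hb).symm
      · exfalso
        have hpre := (PySem.Chars.startswith_iff _ _).1 hs
        have hmem : '-' ∈ tail := hpre.sublist.subset (by simp)
        obtain ⟨k, hk, hkc⟩ := List.mem_iff_getElem.mp hmem
        exact pvRfind_neg h k hk hkc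
  | case2 tail h ih =>
    obtain ⟨m, hm, hr, hch, hmax⟩ := pvRfind_spec h
    have hslice : PySem.List.slice tail none (some (pvRfind tail '-')) = tail.take m := by
      rw [hr, PySem.List.slice_to _ (by omega)]
      simp
    rw [hslice] at ih
    rw [hslice]
    simp only [List.mem_cons, ih]
    constructor
    · rintro (rfl | hsm)
      · simp [slugMatch]
      · rcases Bool.or_eq_true_iff.1 hsm with hb | hs
        · have hp : p = tail.take m := (beq_iff_eq.1 hb).symm
          subst hp
          exact Bool.or_eq_true_iff.2 (Or.inr ((PySem.Chars.startswith_iff _ _).2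
            (take_hyphen_prefix hm hch)))
        · have hpre := (PySem.Chars.startswith_iff _ _).1 hs
          exact Bool.or_eq_true_iff.2 (Or.inr ((PySem.Chars.startswith_iff _ _).2
            (hpre.trans (List.take_prefix m tail))))
    · intro hsm
      rcases Bool.or_eq_true_iff.1 hsm with hb | hs
      · exact Or.inl (beq_iff_eq.1 hb).symm
      · right
        have hpre := (PySem.Chars.startswith_iff _ _).1 hs
        have hlen : p.length + 1 ≤ tail.length := by
          have := hpre.length_le
          simpa using this
        have hptake : p = tail.take p.length :=
          List.prefix_iff_eq_take.1 ((List.prefix_append p ['-']).trans hpre)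
        have hhy : tail[p.length]'(by omega) = '-' := by
          have h1 := hpre.getElem (i := p.length) (by simp)
          simp only [List.getElem_concat_length] at h1
          exact h1.symm
        have hkm : p.length ≤ m := hmax p.length (by omega) hhy
        rcases eq_or_lt_of_le hkm with he | hlt
        · refine Bool.or_eq_true_iff.2 (Or.inl (beq_iff_eq.2 ?_))
          rw [← he]
          exact hptake.symm
        · refine Bool.or_eq_true_iff.2 (Or.inr ((PySem.Chars.startswith_iff _ _).2 ?_))
          rw [List.prefix_take_iff]
          refine ⟨hpre, ?_⟩
          simp only [List.length_append, List.length_singleton]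
          omega

-- ---- first match over length-sorted keys = first key-hit over the candidate chain ----
theorem pv_exists_max (l : List (List Char)) (h : l ≠ []) :
    ∃ x ∈ l, ∀ y ∈ l, y.length ≤ x.length := by
  induction l with
  | nil => exact absurd rfl h
  | cons a rest ih =>
    rcases eq_or_ne rest [] with rfl | hne
    · exact ⟨a, List.mem_singleton_self a, by simp⟩
    · obtain ⟨x, hxm, hxmax⟩ := ih hne
      rcases le_total x.length a.length with hc | hc
      · exact ⟨a, List.mem_cons_self, by
          intro y hy
          rcases List.mem_cons.1 hy with rfl | hy
          · exact le_rfl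
          · exact (hxmax y hy).trans hc⟩
      · exact ⟨x, List.mem_cons_of_mem _ hxm, by
          intro y hy
          rcases List.mem_cons.1 hy with rfl | hy
          · exact hc
          · exact hxmax y hy⟩

theorem pv_find_desc {P : List Char → Bool} {x : List Char} (l : List (List Char))
    (hdesc : l.Pairwise (fun a b => b.length ≤ a.length))
    (hU : ∀ p q, P p = true → P q = true → p.length = q.length → p = q)
    (hx : x ∈ l) (hPx : P x = true)
    (hmax : ∀ y ∈ l, P y = true → y.length ≤ x.length) :
    l.find? P = some x := by
  induction l with
  | nil => cases hx
  | cons a rest ih =>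
    rw [List.pairwise_cons] at hdesc
    by_cases hPa : P a = true
    · have hax : a = x := by
        rcases List.mem_cons.1 hx with rfl | hx'
        · rfl
        · exact hU a x hPa hPx (le_antisymm (hmax a List.mem_cons_self hPa) (hdesc.1 x hx'))
      rw [List.find?_cons_of_pos hPa, hax]
    · have hx' : x ∈ rest := by
        rcases List.mem_cons.1 hx with rfl | hx'
        · exact absurd hPx hPa
        · exact hx'
      rw [List.find?_cons_of_neg hPa]
      exact ih hdesc.2 hx' (fun y hy => hmax y (List.mem_cons_of_mem _ hy))

theorem pv_find_mem_desc {x : List Char} (C K : List (List Char))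
    (hCdesc : C.Pairwise (fun a b => b.length < a.length))
    (hxC : x ∈ C) (hxK : x ∈ K)
    (hnb : ∀ c ∈ C, x.length < c.length → c ∉ K) :
    C.find? (fun c => decide (c ∈ K)) = some x := by
  induction C with
  | nil => cases hxC
  | cons a rest ih =>
    rw [List.pairwise_cons] at hCdesc
    by_cases hK : a ∈ K
    · have hax : a = x := by
        rcases List.mem_cons.1 hxC with rfl | hx'
        · rfl
        · exact absurd hK (hnb a List.mem_cons_self (hCdesc.1 x hx'))
      rw [List.find?_cons_of_pos (by simpa using hK), hax]
    · have hx' : x ∈ rest := by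
        rcases List.mem_cons.1 hxC with rfl | hx'
        · exact absurd hxK hK
        · exact hx'
      rw [List.find?_cons_of_neg (by simpa using hK)]
      exact ih hCdesc.2 hx' (fun c hc hlt => hnb c (List.mem_cons_of_mem _ hc) hlt)

-- the heart: first match over length-sorted keys = first key-hit over any match-complete
-- strictly length-descending candidate list
theorem pv_agree (tail : List Char) (K sortedK C : List (List Char))
    (hperm : sortedK.Perm K)
    (hdesc : sortedK.Pairwise (fun a b => b.length ≤ a.length))
    (hC : ∀ p, p ∈ C ↔ slugMatch tail p = true)
    (hCdesc : C.Pairwise (fun a b => b.length < a.length)) :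
    sortedK.find? (slugMatch tail) = C.find? (fun c => decide (c ∈ K)) := by
  by_cases hex : ∃ y ∈ K, slugMatch tail y = true
  · obtain ⟨y0, hy0K, hy0m⟩ := hex
    have hFne : K.filter (fun y => slugMatch tail y) ≠ [] := by
      intro hnil
      have := List.mem_filter.2 ⟨hy0K, hy0m⟩
      rw [hnil] at this
      cases this
    obtain ⟨x, hxF, hxmax⟩ := pv_exists_max _ hFne
    have hxK : x ∈ K := (List.mem_filter.1 hxF).1
    have hxm : slugMatch tail x = true := (List.mem_filter.1 hxF).2
    have hmaxK : ∀ y ∈ K, slugMatch tail y = true → y.length ≤ x.length := by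
      intro y hyK hym
      exact hxmax y (List.mem_filter.2 ⟨hyK, hym⟩)
    rw [pv_find_desc sortedK hdesc (fun p q => match_unique) (hperm.mem_iff.2 hxK) hxm
      (fun y hy hym => hmaxK y (hperm.subset hy) hym)]
    rw [pv_find_mem_desc C K hCdesc ((hC x).2 hxm) hxK
      (fun c hc hlt hcK => absurd (hmaxK c hcK ((hC c).1 hc)) (by omega))]
  · rw [not_exists] at hex
    simp only [not_and] at hex
    rw [List.find?_eq_none.2 (fun y hy => by
      simpa using hex y (hperm.subset hy))]
    rw [Eq.comm, List.find?_eq_none]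
    intro c hc
    simp only [decide_eq_true_eq]
    intro hcK
    exact absurd ((hC c).1 hc) (by simpa using hex c hcK)

theorem phase1 (tail : List Char) :
    scanSeo tail (PySem.List.sorted seoDict.keys PySem.Chars.len true) = peelSeo tail := by
  rw [scanSeo_eq_find?, peelSeo_eq_find?]
  have hK : seoDict.keys = seoSlugs := by decide
  refine pv_agree tail seoSlugs _ _
    (hK ▸ PySem.List.sorted_perm seoDict.keys PySem.Chars.len true) ?_
    (fun p => mem_candChain_iff tail p) (candChain_desc tail)
  refine (PySem.List.sorted_pairwise_rev seoDict.keys PySem.Chars.len).imp ?_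
  intro a b hab
  simp only [PySem.Chars.len_eq] at hab
  exact_mod_cast hab

theorem phase2 (tail : List Char) :
    scanAlias tail aliasDict.items = peelAlias tail := by
  rw [peelAlias_eq_find?]
  have hitems : aliasDict.items = [("frankfurt".toList, "frankfurt-am-main".toList)] := by decide
  have hkeys : aliasDict.keys = ["frankfurt".toList] := by decide
  rw [hitems, hkeys]
  by_cases h : slugMatch tail ("frankfurt".toList) = true
  · have hmem : "frankfurt".toList ∈ candChain tail := (mem_candChain_iff tail _).2 h
    have hsome : ((candChain tail).find? (fun x => decide (x ∈ ["frankfurt".toList]))).isSome :=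
      List.find?_isSome.mpr ⟨_, hmem, by simp⟩
    obtain ⟨x, hx⟩ := Option.isSome_iff_exists.mp hsome
    have hxe : x = "frankfurt".toList := by
      have := List.find?_some hx
      simpa using this
    rw [hx, hxe]
    simp only [scanAlias, if_pos h]
    decide
  · have hnone : (candChain tail).find? (fun x => decide (x ∈ ["frankfurt".toList])) = none := by
      apply List.find?_eq_none.2
      intro x hx
      simp only [List.mem_singleton, decide_eq_true_eq]
      rintro rfl
      exact h ((mem_candChain_iff tail _).1 hx)
    rw [hnone]
    simp only [scanAlias, if_neg h]
    rfl

-- ===== VERDICT (by name: the statement is the Claim_ definition above) =====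
theorem city_slug_from_branch_spec : Claim_equal_city_slug_from_branch := by
  intro url _
  unfold Spec_city_slug_from_branch city_slug_from_branch city_slug_from_branch_alt
  simp only [tailB_eq, ← phase1, ← phase2]
  cases hs : scanSeo (pvTail url.toList) (PySem.List.sorted seoDict.keys PySem.Chars.len true) with
  | some s => simp [Option.orElse]
  | none =>
    cases ha : scanAlias (pvTail url.toList) aliasDict.items with
    | some c => simp [Option.orElse]
    | none => simp [Option.orElse]
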